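-- pv_equiv track=rewrite | github.com/zulumonkeymetallic/bob | agent/bedrock_adapter.py | get_bedrock_context_length
-- ===== SOURCE A (Python) =====
-- from typing import Any, Dict, List, Optional, Tuple
--
-- BEDROCK_CONTEXT_LENGTHS: Dict[str, int] = {
--     # Anthropic Claude models on Bedrock
--     "anthropic.claude-opus-4-6":     200_000,
--     "anthropic.claude-sonnet-4-6":   200_000,
--     "anthropic.claude-sonnet-4-5":   200_000,
--     "anthropic.claude-haiku-4-5":    200_000,
--     "anthropic.claude-opus-4":       200_000,
--     "anthropic.claude-sonnet-4":     200_000,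
--     "anthropic.claude-3-5-sonnet":   200_000,
--     "anthropic.claude-3-5-haiku":    200_000,
--     "anthropic.claude-3-opus":       200_000,
--     "anthropic.claude-3-sonnet":     200_000,
--     "anthropic.claude-3-haiku":      200_000,
--     # Amazon Nova
--     "amazon.nova-pro":               300_000,
--     "amazon.nova-lite":              300_000,
--     "amazon.nova-micro":             128_000,
--     # Meta Llama
--     "meta.llama4-maverick":          128_000,
--     "meta.llama4-scout":             128_000,
--     "meta.llama3-3-70b-instruct":    128_000,
--     # Mistral
--     "mistral.mistral-large":         128_000,
--     # DeepSeek
--     "deepseek.v3":                   128_000,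
-- }
--
-- BEDROCK_DEFAULT_CONTEXT_LENGTH = 128_000
--
-- def get_bedrock_context_length(model_id: str) -> int:
--     """Look up the context window size for a Bedrock model.
--
--     Uses substring matching so versioned IDs like
--     ``anthropic.claude-sonnet-4-6-20250514-v1:0`` resolve correctly.
--     """
--     model_lower = model_id.lower()
--     best_key = ""
--     best_val = BEDROCK_DEFAULT_CONTEXT_LENGTH
--     for key, val in BEDROCK_CONTEXT_LENGTHS.items():
--         if key in model_lower and len(key) > len(best_key):
--             best_key = key
--             best_val = val
--     return best_val
-- ===== SOURCE B (Python) =====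
-- from typing import Dict, List, Tuple
--
-- BEDROCK_CONTEXT_LENGTHS: Dict[str, int] = {
--     "anthropic.claude-opus-4-6":     200_000,
--     "anthropic.claude-sonnet-4-6":   200_000,
--     "anthropic.claude-sonnet-4-5":   200_000,
--     "anthropic.claude-haiku-4-5":    200_000,
--     "anthropic.claude-opus-4":       200_000,
--     "anthropic.claude-sonnet-4":     200_000,
--     "anthropic.claude-3-5-sonnet":   200_000,
--     "anthropic.claude-3-5-haiku":    200_000,
--     "anthropic.claude-3-opus":       200_000,
--     "anthropic.claude-3-sonnet":     200_000,
--     "anthropic.claude-3-haiku":      200_000,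
--     "amazon.nova-pro":               300_000,
--     "amazon.nova-lite":              300_000,
--     "amazon.nova-micro":             128_000,
--     "meta.llama4-maverick":          128_000,
--     "meta.llama4-scout":             128_000,
--     "meta.llama3-3-70b-instruct":    128_000,
--     "mistral.mistral-large":         128_000,
--     "deepseek.v3":                   128_000,
-- }
--
-- BEDROCK_DEFAULT_CONTEXT_LENGTH = 128_000
--
-- # Keys ordered longest-first once at import time (stable sort keeps dict order among
-- # equal lengths), so the lookup is a single early-return first-match scan.
-- _BEDROCK_BY_LENGTH: List[Tuple[str, int]] = sorted(
--     BEDROCK_CONTEXT_LENGTHS.items(), key=lambda kv: len(kv[0]), reverse=True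
-- )
--
-- def get_bedrock_context_length(model_id: str) -> int:
--     """Look up the context window size for a Bedrock model."""
--     model_lower = model_id.lower()
--     for key, val in _BEDROCK_BY_LENGTH:
--         if key in model_lower:
--             return val
--     return BEDROCK_DEFAULT_CONTEXT_LENGTH
-- ===== Notes on version B (the rewrite author's own statement) =====
-- stated objective: alternative
-- what changed: Replaces the scan-all-keys-and-track-the-longest loop by a table of (key, value) pairs sorted once, longest key first (stable, preserving dict order among equal lengths), so the lookup is a first-substring-match scan with an early return.
import Mathlib
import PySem

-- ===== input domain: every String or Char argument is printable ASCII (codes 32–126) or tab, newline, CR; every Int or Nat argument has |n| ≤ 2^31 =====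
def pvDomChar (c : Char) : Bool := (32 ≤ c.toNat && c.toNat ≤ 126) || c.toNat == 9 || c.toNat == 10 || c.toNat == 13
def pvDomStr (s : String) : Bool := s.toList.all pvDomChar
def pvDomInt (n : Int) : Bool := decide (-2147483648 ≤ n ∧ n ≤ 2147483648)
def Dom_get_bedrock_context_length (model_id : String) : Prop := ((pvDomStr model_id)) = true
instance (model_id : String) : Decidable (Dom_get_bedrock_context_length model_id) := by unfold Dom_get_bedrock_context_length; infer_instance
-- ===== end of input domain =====

-- B sorts the lookup table once by descending key length (stable) and returns the first
-- substring match, instead of A's scan over all keys tracking the longest match (alternative decomposition).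

-- ===== PORT A =====
-- BEDROCK_CONTEXT_LENGTHS (dict as association list in insertion order)
def pvBedrockTable : List (String × Int) :=
  [("anthropic.claude-opus-4-6", 200000),
   ("anthropic.claude-sonnet-4-6", 200000),
   ("anthropic.claude-sonnet-4-5", 200000),
   ("anthropic.claude-haiku-4-5", 200000),
   ("anthropic.claude-opus-4", 200000),
   ("anthropic.claude-sonnet-4", 200000),
   ("anthropic.claude-3-5-sonnet", 200000),
   ("anthropic.claude-3-5-haiku", 200000),
   ("anthropic.claude-3-opus", 200000),
   ("anthropic.claude-3-sonnet", 200000),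
   ("anthropic.claude-3-haiku", 200000),
   ("amazon.nova-pro", 300000),
   ("amazon.nova-lite", 300000),
   ("amazon.nova-micro", 128000),
   ("meta.llama4-maverick", 128000),
   ("meta.llama4-scout", 128000),
   ("meta.llama3-3-70b-instruct", 128000),
   ("mistral.mistral-large", 128000),
   ("deepseek.v3", 128000)]

-- the loop body: if key in model_lower and len(key) > len(best_key): best_key, best_val = key, val
def pvStep (model_lower : String) (b kv : String × Int) : String × Int :=
  if PySem.Str.isIn kv.1 model_lower && decide (PySem.Str.len kv.1 > PySem.Str.len b.1) then kv else b

def get_bedrock_context_length (model_id : String) : Int :=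
  (pvBedrockTable.foldl (pvStep (PySem.Str.lower model_id)) ("", 128000)).2

-- ===== PORT B =====
-- _BEDROCK_BY_LENGTH = sorted(BEDROCK_CONTEXT_LENGTHS.items(), key=lambda kv: len(kv[0]), reverse=True)
def pvBedrockByLength : List (String × Int) :=
  PySem.List.sorted pvBedrockTable (fun kv => PySem.Str.len kv.1) true

-- for key, val in _BEDROCK_BY_LENGTH: if key in model_lower: return val / return default
def pvFirstMatch (model_lower : String) : List (String × Int) → Int
  | [] => 128000
  | (key, val) :: rest => if PySem.Str.isIn key model_lower then val else pvFirstMatch model_lower rest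

def get_bedrock_context_length_alt (model_id : String) : Int :=
  pvFirstMatch (PySem.Str.lower model_id) pvBedrockByLength

-- ===== PRECONDITION & SPEC =====
def Spec_get_bedrock_context_length (model_id : String) (out : Int) : Prop := out = get_bedrock_context_length_alt model_id
instance (model_id : String) (out : Int) : Decidable (Spec_get_bedrock_context_length model_id out) := by unfold Spec_get_bedrock_context_length; infer_instance

-- ===== CLAIM (what is proved, stated in full; the proofs are below) =====
def Claim_equal_get_bedrock_context_length : Prop := ∀ (model_id : String), Dom_get_bedrock_context_length model_id → Spec_get_bedrock_context_length model_id (get_bedrock_context_length model_id)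

-- ===== LEMMAS AND PROOFS =====

-- Proof-side stable insertion sort by descending key length (the order B's table has).
def pvIns (p : String × Int) : List (String × Int) → List (String × Int)
  | [] => [p]
  | q :: t => if PySem.Str.len p.1 < PySem.Str.len q.1 then q :: pvIns p t else p :: q :: t

def pvSortLen : List (String × Int) → List (String × Int)
  | [] => []
  | p :: t => pvIns p (pvSortLen t)

-- Value of B's scan generalised by a length threshold n: the first match counts only if longer than n.
def pvFmB (s : String) (n dv : Int) : List (String × Int) → Int
  | [] => dv
  | p :: t => if PySem.Str.isIn p.1 s then (if n < PySem.Str.len p.1 then p.2 else dv) else pvFmB s n dv t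

-- one-step unfolding lemmas (rfl), to keep goals in PySem.Str form
lemma pvFmB_cons (s : String) (n dv : Int) (p : String × Int) (t : List (String × Int)) :
    pvFmB s n dv (p :: t) =
      if PySem.Str.isIn p.1 s then (if n < PySem.Str.len p.1 then p.2 else dv) else pvFmB s n dv t := rfl

lemma pvIns_cons (p q : String × Int) (t : List (String × Int)) :
    pvIns p (q :: t) =
      if PySem.Str.len p.1 < PySem.Str.len q.1 then q :: pvIns p t else p :: q :: t := rfl

lemma pvFirstMatch_cons (s key : String) (val : Int) (t : List (String × Int)) :
    pvFirstMatch s ((key, val) :: t) = if PySem.Str.isIn key s then val else pvFirstMatch s t := rfl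

lemma pvFmB_of_le (s : String) (n dv : Int) (S : List (String × Int))
    (h : ∀ q ∈ S, PySem.Str.len q.1 ≤ n) : pvFmB s n dv S = dv := by
  induction S with
  | nil => rfl
  | cons q t ih =>
    have hq := h q (List.mem_cons_self ..)
    rw [pvFmB_cons]
    by_cases hm : PySem.Str.isIn q.1 s = true
    · rw [if_pos hm, if_neg (not_lt.mpr hq)]
    · rw [if_neg hm]
      exact ih (fun r hr => h r (List.mem_cons_of_mem _ hr))

lemma pvIns_mem {q p : String × Int} {S : List (String × Int)} (h : q ∈ pvIns p S) :
    q = p ∨ q ∈ S := by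
  induction S with
  | nil => simpa [pvIns] using h
  | cons r t ih =>
    rw [pvIns_cons] at h
    split at h
    · rcases List.mem_cons.mp h with h | h
      · exact Or.inr (List.mem_cons.mpr (Or.inl h))
      · rcases ih h with h | h
        · exact Or.inl h
        · exact Or.inr (List.mem_cons.mpr (Or.inr h))
    · simp only [List.mem_cons] at h ⊢
      tauto

lemma pvDesc_ins (p : String × Int) (S : List (String × Int))
    (h : S.Pairwise (fun a b => PySem.Str.len b.1 ≤ PySem.Str.len a.1)) :
    (pvIns p S).Pairwise (fun a b => PySem.Str.len b.1 ≤ PySem.Str.len a.1) := by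
  induction S with
  | nil => simp [pvIns]
  | cons r t ih =>
    rcases List.pairwise_cons.mp h with ⟨hr, ht⟩
    rw [pvIns_cons]
    split
    · rename_i hlt
      refine List.pairwise_cons.mpr ⟨?_, ih ht⟩
      intro q hq
      rcases pvIns_mem hq with rfl | hq
      · exact le_of_lt hlt
      · exact hr q hq
    · rename_i hge
      rw [not_lt] at hge
      refine List.pairwise_cons.mpr ⟨?_, h⟩
      intro q hq
      rcases List.mem_cons.mp hq with rfl | hq
      · exact hge
      · exact le_trans (hr q hq) hge

lemma pvDesc_sortLen (L : List (String × Int)) :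
    (pvSortLen L).Pairwise (fun a b => PySem.Str.len b.1 ≤ PySem.Str.len a.1) := by
  induction L with
  | nil => simp [pvSortLen]
  | cons p t ih => exact pvDesc_ins p (pvSortLen t) ih

lemma pvFmB_ins_take (s : String) (n dv : Int) (p : String × Int) (S : List (String × Int))
    (hm : PySem.Str.isIn p.1 s = true) (hn : n < PySem.Str.len p.1)
    (hS : S.Pairwise (fun a b => PySem.Str.len b.1 ≤ PySem.Str.len a.1)) :
    pvFmB s n dv (pvIns p S) = pvFmB s (PySem.Str.len p.1) p.2 S := by
  induction S with
  | nil =>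
    show pvFmB s n dv [p] = p.2
    rw [show ([p] : List (String × Int)) = p :: [] from rfl, pvFmB_cons, if_pos hm, if_pos hn]
  | cons q t ih =>
    rcases List.pairwise_cons.mp hS with ⟨hq, ht⟩
    rw [pvIns_cons]
    split
    · rename_i hlt
      rw [pvFmB_cons, pvFmB_cons]
      by_cases hmq : PySem.Str.isIn q.1 s = true
      · rw [if_pos hmq, if_pos hmq, if_pos (hn.trans hlt), if_pos hlt]
      · rw [if_neg hmq, if_neg hmq]
        exact ih ht
    · rename_i hge
      rw [not_lt] at hge
      rw [pvFmB_cons, if_pos hm, if_pos hn, pvFmB_cons]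
      by_cases hmq : PySem.Str.isIn q.1 s = true
      · rw [if_pos hmq, if_neg (not_lt.mpr hge)]
      · rw [if_neg hmq]
        exact (pvFmB_of_le s (PySem.Str.len p.1) p.2 t (fun r hr => le_trans (hq r hr) hge)).symm

lemma pvFmB_ins_keep (s : String) (n dv : Int) (p : String × Int) (S : List (String × Int))
    (hk : PySem.Str.isIn p.1 s = false ∨ PySem.Str.len p.1 ≤ n)
    (hS : S.Pairwise (fun a b => PySem.Str.len b.1 ≤ PySem.Str.len a.1)) :
    pvFmB s n dv (pvIns p S) = pvFmB s n dv S := by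
  induction S with
  | nil =>
    show pvFmB s n dv (p :: []) = dv
    rw [pvFmB_cons]
    rcases hk with hk | hk
    · rw [if_neg (by rw [hk]; exact Bool.false_ne_true)]; rfl
    · by_cases hmp : PySem.Str.isIn p.1 s = true
      · rw [if_pos hmp, if_neg (not_lt.mpr hk)]
      · rw [if_neg hmp]; rfl
  | cons q t ih =>
    rcases List.pairwise_cons.mp hS with ⟨hq, ht⟩
    rw [pvIns_cons]
    split
    · rename_i hlt
      rw [pvFmB_cons, pvFmB_cons s n dv q t]
      by_cases hmq : PySem.Str.isIn q.1 s = true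
      · rw [if_pos hmq, if_pos hmq]
      · rw [if_neg hmq, if_neg hmq]
        exact ih ht
    · rename_i hge
      rw [not_lt] at hge
      rw [pvFmB_cons s n dv p (q :: t)]
      rcases hk with hk | hk
      · rw [if_neg (by rw [hk]; exact Bool.false_ne_true)]
      · have hall : ∀ r ∈ q :: t, PySem.Str.len r.1 ≤ n := by
          intro r hr
          rcases List.mem_cons.mp hr with rfl | hr
          · exact le_trans hge hk
          · exact le_trans (le_trans (hq r hr) hge) hk
        rw [pvFmB_of_le s n dv (q :: t) hall]
        by_cases hmp : PySem.Str.isIn p.1 s = true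
        · rw [if_pos hmp, if_neg (not_lt.mpr hk)]
        · rw [if_neg hmp]

-- A's fold from an arbitrary best-so-far equals the thresholded first match over the sorted tail.
lemma pvFold_eq (s : String) (L : List (String × Int)) : ∀ bk bv,
    (L.foldl (pvStep s) (bk, bv)).2 = pvFmB s (PySem.Str.len bk) bv (pvSortLen L) := by
  induction L with
  | nil => intro bk bv; rfl
  | cons p t ih =>
    intro bk bv
    rw [List.foldl_cons, show pvSortLen (p :: t) = pvIns p (pvSortLen t) from rfl]
    by_cases hm : PySem.Str.isIn p.1 s = true
    · by_cases hn : PySem.Str.len bk < PySem.Str.len p.1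
      · have hstep : pvStep s (bk, bv) p = p := by
          show (if PySem.Str.isIn p.1 s && decide (PySem.Str.len p.1 > PySem.Str.len bk) then p else (bk, bv)) = p
          rw [if_pos (by rw [hm, Bool.true_and]; exact decide_eq_true hn)]
        rw [hstep, pvFmB_ins_take s (PySem.Str.len bk) bv p (pvSortLen t) hm hn (pvDesc_sortLen t)]
        exact ih p.1 p.2
      · have hstep : pvStep s (bk, bv) p = (bk, bv) := by
          show (if PySem.Str.isIn p.1 s && decide (PySem.Str.len p.1 > PySem.Str.len bk) then p else (bk, bv)) = (bk, bv)
          rw [if_neg (by rw [hm, Bool.true_and]; exact fun h => hn (of_decide_eq_true h))]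
        rw [hstep, pvFmB_ins_keep s (PySem.Str.len bk) bv p (pvSortLen t) (Or.inr (not_lt.mp hn)) (pvDesc_sortLen t)]
        exact ih bk bv
    · have hm' : PySem.Str.isIn p.1 s = false := by
        cases h : PySem.Str.isIn p.1 s
        · rfl
        · exact absurd h hm
      have hstep : pvStep s (bk, bv) p = (bk, bv) := by
        show (if PySem.Str.isIn p.1 s && decide (PySem.Str.len p.1 > PySem.Str.len bk) then p else (bk, bv)) = (bk, bv)
        rw [if_neg (by rw [hm', Bool.false_and]; exact Bool.false_ne_true)]
      rw [hstep, pvFmB_ins_keep s (PySem.Str.len bk) bv p (pvSortLen t) (Or.inl hm') (pvDesc_sortLen t)]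
      exact ih bk bv

-- At threshold 0, on a table of nonempty keys, the thresholded scan is B's plain first-match scan.
lemma pvFmB_zero (s : String) (S : List (String × Int))
    (h : ∀ q ∈ S, 0 < PySem.Str.len q.1) :
    pvFmB s 0 128000 S = pvFirstMatch s S := by
  induction S with
  | nil => rfl
  | cons q t ih =>
    obtain ⟨k, v⟩ := q
    have hq : (0 : Int) < PySem.Str.len k := h (k, v) (List.mem_cons_self ..)
    rw [pvFmB_cons, pvFirstMatch_cons]
    by_cases hm : PySem.Str.isIn k s = true
    · rw [if_pos hm, if_pos hm, if_pos hq]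
    · rw [if_neg hm, if_neg hm]
      exact ih (fun r hr => h r (List.mem_cons_of_mem _ hr))

-- The proof-side sort really is B's table (both are the stable longest-first ordering).
lemma pvSortLen_table : pvSortLen pvBedrockTable = pvBedrockByLength := by decide

lemma pvKeysPos : ∀ q ∈ pvBedrockByLength, 0 < PySem.Str.len q.1 := by decide

-- ===== VERDICT (by name: the statement is the Claim_ definition above) =====
theorem get_bedrock_context_length_spec : Claim_equal_get_bedrock_context_length := by
  intro model_id _hdom
  unfold Spec_get_bedrock_context_length get_bedrock_context_length get_bedrock_context_length_alt
  rw [pvFold_eq (PySem.Str.lower model_id) pvBedrockTable "" 128000, pvSortLen_table,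
      show PySem.Str.len "" = 0 from rfl]
  exact pvFmB_zero (PySem.Str.lower model_id) pvBedrockByLength pvKeysPos
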